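-- pv_equiv track=rewrite | github.com/reuben89raj/modbus-p4 | pod-topo/getTopo.py | get_hosts_connected_to_switch_with_ports_and_routers
-- ===== SOURCE A (Python) =====
-- def get_hosts_connected_to_switch_with_ports_and_routers(links):
--   """
--   Get hosts connected to each switch, along with the ports for each switch, and the ports connected to routers.
--
--   Args:
--     links: A list of links, where each link is a tuple of two strings:
--       (device1, device2)
--
--   Returns:
--     A dictionary mapping switches to a list of tuples, where each tuple is a host and a port.
--   """
--
--   # Create a dictionary mapping switch names to a list of tuples. The dictionary is initialized with an empty list for each switch.
--   hosts_connected_to_switch_with_ports_and_routers = {}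
--   for device1, device2 in links:
--     if device1.startswith("h"):
--       switch = device2.split("-")[0]
--       if switch not in hosts_connected_to_switch_with_ports_and_routers:
--         hosts_connected_to_switch_with_ports_and_routers[switch] = []
--       hosts_connected_to_switch_with_ports_and_routers[switch].append((device1, device2.split("-")[1]))
--     elif device1.startswith("r"):
--       switch = device2.split("-")[0]
--       if switch not in hosts_connected_to_switch_with_ports_and_routers:
--         hosts_connected_to_switch_with_ports_and_routers[switch] = []
--       hosts_connected_to_switch_with_ports_and_routers[switch].append((device1, device2.split("-")[1]))
--
--   # Create a dictionary mapping switch names to a list of ports that connect to end hosts starting with "h".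
--   hosts_connected_to_switch_ports = {}
--   for switch, hosts in hosts_connected_to_switch_with_ports_and_routers.items():
--     hosts_connected_to_switch_ports[switch] = []
--     for host, port in hosts:
--       if host.startswith("h"):
--         hosts_connected_to_switch_ports[switch].append(port)
--
--   # Create a dictionary mapping switch names to a list of ports that connect to routers.
--   router_connected_to_switch_ports = {}
--   for switch, hosts in hosts_connected_to_switch_with_ports_and_routers.items():
--     router_connected_to_switch_ports[switch] = []
--     for host, port in hosts:
--       if host.startswith("r"):
--         router_connected_to_switch_ports[switch].append(port)
--
--   # Return the three dictionaries.
--   return hosts_connected_to_switch_with_ports_and_routers, hosts_connected_to_switch_ports, router_connected_to_switch_ports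
-- ===== SOURCE B (Python) =====
-- def get_hosts_connected_to_switch_with_ports_and_routers(links):
--   """Single pass over links: build all three dictionaries at once."""
--   by_switch = {}
--   host_ports = {}
--   router_ports = {}
--   for dev, iface in links:
--     if not dev.startswith(("h", "r")):
--       continue
--     parts = iface.split("-")
--     switch, port = parts[0], parts[1]
--     if switch not in by_switch:
--       by_switch[switch] = []
--       host_ports[switch] = []
--       router_ports[switch] = []
--     by_switch[switch].append((dev, port))
--     if dev.startswith("h"):
--       host_ports[switch].append(port)
--     else:
--       router_ports[switch].append(port)
--   return by_switch, host_ports, router_ports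
-- ===== Notes on version B (the rewrite author's own statement) =====
-- stated objective: simpler
-- what changed: B builds all three dictionaries in a single pass over the links (splitting each interface name once and registering the switch key in all three dicts at first sight), instead of A's grouping pass followed by two separate re-traversals of the grouped dictionary.
import Mathlib
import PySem

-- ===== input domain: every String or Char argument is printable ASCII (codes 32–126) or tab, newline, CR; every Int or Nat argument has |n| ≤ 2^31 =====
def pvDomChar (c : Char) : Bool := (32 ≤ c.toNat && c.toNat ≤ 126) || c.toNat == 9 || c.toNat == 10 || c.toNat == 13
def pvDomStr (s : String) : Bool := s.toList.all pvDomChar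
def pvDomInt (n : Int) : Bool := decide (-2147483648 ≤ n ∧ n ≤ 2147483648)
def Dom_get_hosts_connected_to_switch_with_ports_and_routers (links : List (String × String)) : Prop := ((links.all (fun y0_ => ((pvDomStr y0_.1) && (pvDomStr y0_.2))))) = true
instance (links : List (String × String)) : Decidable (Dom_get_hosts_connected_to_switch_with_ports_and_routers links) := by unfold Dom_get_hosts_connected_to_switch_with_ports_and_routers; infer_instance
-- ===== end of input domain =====

-- B builds all three dictionaries in one pass over the links instead of A's grouping pass plus two re-traversals (objective: simpler).


-- ===== PORT A =====
-- iface.split("-")  (sep is the literal "-" ≠ "", so split? is always `some`)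
def pvSplitDash (s : String) : List String := (PySem.Str.split? s "-").getD []

-- one step of A's first loop (grouping pass)
def pvStepA1 (d : PySem.Dict String (List (String × String))) (p : String × String) :
    PySem.Dict String (List (String × String)) :=
  if PySem.Str.startswith p.1 "h" then
    let parts := pvSplitDash p.2
    let sw := PySem.List.pyGetD parts 0 ""
    let d := if d.contains sw then d else d.insert sw []
    d.modify sw [] (· ++ [(p.1, PySem.List.pyGetD parts 1 "")])
  else if PySem.Str.startswith p.1 "r" then
    let parts := pvSplitDash p.2
    let sw := PySem.List.pyGetD parts 0 ""
    let d := if d.contains sw then d else d.insert sw []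
    d.modify sw [] (· ++ [(p.1, PySem.List.pyGetD parts 1 "")])
  else d

-- one step of A's second/third loop over the grouped dict's items (c = "h" resp. "r")
def pvPassStep (c : String) (e : PySem.Dict String (List String))
    (q : String × List (String × String)) : PySem.Dict String (List String) :=
  q.2.foldl (fun e hp => if PySem.Str.startswith hp.1 c then e.modify q.1 [] (· ++ [hp.2]) else e)
    (e.insert q.1 [])

def get_hosts_connected_to_switch_with_ports_and_routers (links : List (String × String)) : (List (String × List (String × String))) × (List (String × List String)) × (List (String × List String)) :=
  let d1 := links.foldl pvStepA1 PySem.Dict.empty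
  let d2 := d1.items.foldl (pvPassStep "h") PySem.Dict.empty
  let d3 := d1.items.foldl (pvPassStep "r") PySem.Dict.empty
  (d1.items, d2.items, d3.items)

-- ===== PORT B =====
-- one step of B's single loop: update all three dicts at once
def pvStepB
    (s : PySem.Dict String (List (String × String)) × PySem.Dict String (List String) × PySem.Dict String (List String))
    (p : String × String) :
    PySem.Dict String (List (String × String)) × PySem.Dict String (List String) × PySem.Dict String (List String) :=
  if PySem.Str.startswith p.1 "h" || PySem.Str.startswith p.1 "r" then
    let parts := pvSplitDash p.2
    let sw := PySem.List.pyGetD parts 0 ""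
    let port := PySem.List.pyGetD parts 1 ""
    let d1 := if s.1.contains sw then s.1 else s.1.insert sw []
    let d2 := if s.1.contains sw then s.2.1 else s.2.1.insert sw []
    let d3 := if s.1.contains sw then s.2.2 else s.2.2.insert sw []
    let d1 := d1.modify sw [] (· ++ [(p.1, port)])
    if PySem.Str.startswith p.1 "h" then (d1, d2.modify sw [] (· ++ [port]), d3)
    else (d1, d2, d3.modify sw [] (· ++ [port]))
  else s

def get_hosts_connected_to_switch_with_ports_and_routers_alt (links : List (String × String)) : (List (String × List (String × String))) × (List (String × List String)) × (List (String × List String)) :=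
  let s := links.foldl pvStepB (PySem.Dict.empty, PySem.Dict.empty, PySem.Dict.empty)
  (s.1.items, s.2.1.items, s.2.2.items)

-- ===== PRECONDITION & SPEC =====
-- Pre_ excludes exactly the inputs on which the Python A raises IndexError: a link whose
-- first device starts with "h" or "r" but whose second device contains no "-".
def Pre_get_hosts_connected_to_switch_with_ports_and_routers (links : List (String × String)) : Prop :=
  ∀ p ∈ links, (PySem.Str.startswith p.1 "h" = true ∨ PySem.Str.startswith p.1 "r" = true) →
    PySem.Str.isIn "-" p.2 = true
instance (links : List (String × String)) : Decidable (Pre_get_hosts_connected_to_switch_with_ports_and_routers links) := by unfold Pre_get_hosts_connected_to_switch_with_ports_and_routers; infer_instance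
def pvWitness_get_hosts_connected_to_switch_with_ports_and_routers : (List (String × String)) :=
  [("h1", "s1-2"), ("r1", "s1-3"), ("h2", "s2-1"), ("x", "junk")]

def Spec_get_hosts_connected_to_switch_with_ports_and_routers (links : List (String × String)) (out : (List (String × List (String × String))) × (List (String × List String)) × (List (String × List String))) : Prop := out = get_hosts_connected_to_switch_with_ports_and_routers_alt links
instance (links : List (String × String)) (out : (List (String × List (String × String))) × (List (String × List String)) × (List (String × List String))) : Decidable (Spec_get_hosts_connected_to_switch_with_ports_and_routers links out) := by unfold Spec_get_hosts_connected_to_switch_with_ports_and_routers; infer_instance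

-- ===== CLAIM (what is proved, stated in full; the proofs are below) =====
def Claim_equal_get_hosts_connected_to_switch_with_ports_and_routers : Prop := ∀ (links : List (String × String)), Dom_get_hosts_connected_to_switch_with_ports_and_routers links → Pre_get_hosts_connected_to_switch_with_ports_and_routers links → Spec_get_hosts_connected_to_switch_with_ports_and_routers links (get_hosts_connected_to_switch_with_ports_and_routers links)

-- ===== LEMMAS AND PROOFS =====

-- the ports that pass c ("h"/"r") extracts from a group's host list
def pvPorts (c : String) (hosts : List (String × String)) : List String :=
  (hosts.filter (fun hp => PySem.Str.startswith hp.1 c)).map (·.2)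

theorem pv_h_not_r (s : String) (h : PySem.Str.startswith s "h" = true) :
    PySem.Str.startswith s "r" = false := by
  simp only [PySem.Str.startswith, PySem.Chars.startswith] at *
  have e1 : "h".toList = ['h'] := rfl
  have e2 : "r".toList = ['r'] := rfl
  rw [e1] at h; rw [e2]
  cases hs : s.toList with
  | nil => rw [hs] at h; simp [List.isPrefixOf] at h
  | cons a t =>
    rw [hs] at h
    simp [List.isPrefixOf] at h ⊢
    intro hr
    subst hr
    exact absurd h (by decide)

-- a string cannot start with both "h" and "r"; inner loop of a pass collapses to one insert
theorem pvInner_collapse (c sw : String) (hosts : List (String × String))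
    (e : PySem.Dict String (List String)) (v : List String) :
    hosts.foldl (fun e hp => if PySem.Str.startswith hp.1 c then e.modify sw [] (· ++ [hp.2]) else e)
      (e.insert sw v) = e.insert sw (v ++ pvPorts c hosts) := by
  induction hosts generalizing v with
  | nil => simp [pvPorts]
  | cons hp t ih =>
    have hmod : (e.insert sw v).modify sw [] (· ++ [hp.2]) = e.insert sw (v ++ [hp.2]) := by
      rw [PySem.Dict.modify, PySem.Dict.getD_insert_self, PySem.Dict.insert_insert_self]
    cases hcb : PySem.Str.startswith hp.1 c with
    | true =>
      simp only [List.foldl_cons, hcb, if_true]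
      rw [hmod, ih]
      have hcb' : PySem.Chars.startswith hp.1.toList c.toList = true := by simpa using hcb
      simp [pvPorts, hcb', List.append_assoc]
    | false =>
      simp only [List.foldl_cons, hcb, Bool.false_eq_true, if_false]
      rw [ih]
      have hcb' : PySem.Chars.startswith hp.1.toList c.toList = false := by simpa using hcb
      simp [pvPorts, hcb']

theorem pvPass_items (c : String) (items : List (String × List (String × String)))
    (e : PySem.Dict String (List String))
    (hfresh : ∀ q ∈ items, e.contains q.1 = false)
    (hnd : (items.map Prod.fst).Nodup) :
    (items.foldl (pvPassStep c) e).items = e.items ++ items.map (fun q => (q.1, pvPorts c q.2)) := by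
  induction items generalizing e with
  | nil => simp
  | cons q t ih =>
    simp only [List.foldl_cons, pvPassStep]
    rw [pvInner_collapse]
    have hq : e.contains q.1 = false := hfresh q (by simp)
    have hnd0 : (q.1 :: t.map Prod.fst).Nodup := by simpa using hnd
    have hq1 : q.1 ∉ t.map Prod.fst := (List.nodup_cons.mp hnd0).1
    have hnd' : (t.map Prod.fst).Nodup := (List.nodup_cons.mp hnd0).2
    rw [ih]
    · rw [PySem.Dict.items_insert_of_not_contains _ _ hq]
      simp
    · intro q' hq'
      rw [PySem.Dict.contains_insert]
      have : q'.1 ≠ q.1 := by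
        intro h
        exact hq1 (by rw [← h]; exact List.mem_map_of_mem hq')
      simp [this, hfresh q' (List.mem_cons_of_mem _ hq')]
    · exact hnd'

-- members of a nodup-keys items list with the same key are equal
theorem pv_mem_eq (l : List (String × List (String × String)))
    (h : (l.map Prod.fst).Nodup) {k : String} {v : List (String × String)}
    (hv : (k, v) ∈ l) {p : String × List (String × String)} (hp : p ∈ l) (hk : p.1 = k) :
    p = (k, v) := by
  exact List.inj_on_of_nodup_map h hp hv (by simpa using hk)

theorem pvE_keys (d1 : PySem.Dict String (List (String × String)))
    (e : PySem.Dict String (List String)) (c : String)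
    (he : e.items = d1.items.map (fun q => (q.1, pvPorts c q.2))) :
    e.keys = d1.keys := by
  simp [PySem.Dict.keys, he, List.map_map, Function.comp]

theorem pvE_contains (d1 : PySem.Dict String (List (String × String)))
    (e : PySem.Dict String (List String)) (c : String)
    (he : e.items = d1.items.map (fun q => (q.1, pvPorts c q.2))) (sw : String) :
    e.contains sw = d1.contains sw := by
  rw [PySem.Dict.contains_eq_decide_mem_keys, PySem.Dict.contains_eq_decide_mem_keys,
    pvE_keys d1 e c he]

theorem pvE_modify (d1 : PySem.Dict String (List (String × String)))
    (e : PySem.Dict String (List String)) (c : String)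
    (hnd : d1.keys.Nodup)
    (he : e.items = d1.items.map (fun q => (q.1, pvPorts c q.2)))
    (sw : String) (x : String × String) (hc : d1.contains sw = true)
    (hcx : PySem.Str.startswith x.1 c = true) :
    (e.modify sw [] (· ++ [x.2])).items
      = (d1.insert sw (d1.getD sw [] ++ [x])).items.map (fun q => (q.1, pvPorts c q.2)) := by
  have hce : e.contains sw = true := by rw [pvE_contains d1 e c he]; exact hc
  have hnde : e.keys.Nodup := by rw [pvE_keys d1 e c he]; exact hnd
  obtain ⟨old, hold⟩ : ∃ old, d1.get? sw = some old := by
    rw [← Option.isSome_iff_exists, ← PySem.Dict.contains_eq_isSome_get?]; exact hc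
  have holdmem : (sw, old) ∈ d1.items := PySem.Dict.mem_items_of_get?_eq_some _ hold
  have hgetD : d1.getD sw [] = old := PySem.Dict.getD_of_mem_items _ holdmem hnd []
  have hmemE : (sw, pvPorts c old) ∈ e.items := by
    rw [he]; exact List.mem_map_of_mem holdmem
  have hgE : e.getD sw [] = pvPorts c old := PySem.Dict.getD_of_mem_items _ hmemE hnde []
  rw [PySem.Dict.modify, hgE, PySem.Dict.items_insert_of_contains _ _ hce,
    hgetD, PySem.Dict.items_insert_of_contains _ _ hc, he, List.map_map, List.map_map]
  apply List.map_congr_left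
  intro q hq
  simp only [Function.comp]
  by_cases hqs : q.1 = sw
  · have hqe : q = (sw, old) := pv_mem_eq d1.items hnd holdmem hq hqs
    subst hqe
    have hcx' := hcx
    simp only [PySem.Str.startswith] at hcx'
    simp [pvPorts, hcx']
  · simp [hqs]

theorem pvE_skip (d1 : PySem.Dict String (List (String × String)))
    (e : PySem.Dict String (List String)) (c : String)
    (hnd : d1.keys.Nodup)
    (he : e.items = d1.items.map (fun q => (q.1, pvPorts c q.2)))
    (sw : String) (x : String × String) (hc : d1.contains sw = true)
    (hcx : PySem.Str.startswith x.1 c = false) :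
    e.items = (d1.insert sw (d1.getD sw [] ++ [x])).items.map (fun q => (q.1, pvPorts c q.2)) := by
  obtain ⟨old, hold⟩ : ∃ old, d1.get? sw = some old := by
    rw [← Option.isSome_iff_exists, ← PySem.Dict.contains_eq_isSome_get?]; exact hc
  have holdmem : (sw, old) ∈ d1.items := PySem.Dict.mem_items_of_get?_eq_some _ hold
  have hgetD : d1.getD sw [] = old := PySem.Dict.getD_of_mem_items _ holdmem hnd []
  rw [hgetD, PySem.Dict.items_insert_of_contains _ _ hc, he, List.map_map]
  apply List.map_congr_left
  intro q hq
  simp only [Function.comp]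
  by_cases hqs : q.1 = sw
  · have hqe : q = (sw, old) := pv_mem_eq d1.items hnd holdmem hq hqs
    subst hqe
    have hcx' := hcx
    simp only [PySem.Str.startswith] at hcx'
    simp [pvPorts, hcx']
  · simp [hqs]

theorem pvE_fresh_app (d1 : PySem.Dict String (List (String × String)))
    (e : PySem.Dict String (List String)) (c : String)
    (he : e.items = d1.items.map (fun q => (q.1, pvPorts c q.2)))
    (sw : String) (x : String × String) (hc : d1.contains sw = false)
    (hcx : PySem.Str.startswith x.1 c = true) :
    ((e.insert sw []).modify sw [] (· ++ [x.2])).items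
      = (d1.insert sw [x]).items.map (fun q => (q.1, pvPorts c q.2)) := by
  have hce : e.contains sw = false := by rw [pvE_contains d1 e c he]; exact hc
  rw [PySem.Dict.modify, PySem.Dict.getD_insert_self, PySem.Dict.insert_insert_self,
    PySem.Dict.items_insert_of_not_contains _ _ hce,
    PySem.Dict.items_insert_of_not_contains _ _ hc, he]
  have hcx' := hcx
  simp only [PySem.Str.startswith] at hcx'
  simp [pvPorts, hcx']

theorem pvE_fresh_skip (d1 : PySem.Dict String (List (String × String)))
    (e : PySem.Dict String (List String)) (c : String)
    (he : e.items = d1.items.map (fun q => (q.1, pvPorts c q.2)))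
    (sw : String) (x : String × String) (hc : d1.contains sw = false)
    (hcx : PySem.Str.startswith x.1 c = false) :
    (e.insert sw []).items
      = (d1.insert sw [x]).items.map (fun q => (q.1, pvPorts c q.2)) := by
  have hce : e.contains sw = false := by rw [pvE_contains d1 e c he]; exact hc
  rw [PySem.Dict.items_insert_of_not_contains _ _ hce,
    PySem.Dict.items_insert_of_not_contains _ _ hc, he]
  have hcx' := hcx
  simp only [PySem.Str.startswith] at hcx'
  simp [pvPorts, hcx']

-- single-step invariant
theorem pvStep_inv (d1 : PySem.Dict String (List (String × String)))
    (e2 e3 : PySem.Dict String (List String)) (p : String × String)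
    (hnd : d1.keys.Nodup)
    (h2 : e2.items = d1.items.map (fun q => (q.1, pvPorts "h" q.2)))
    (h3 : e3.items = d1.items.map (fun q => (q.1, pvPorts "r" q.2))) :
    (pvStepB (d1, e2, e3) p).1 = pvStepA1 d1 p
    ∧ (pvStepA1 d1 p).keys.Nodup
    ∧ (pvStepB (d1, e2, e3) p).2.1.items
        = (pvStepA1 d1 p).items.map (fun q => (q.1, pvPorts "h" q.2))
    ∧ (pvStepB (d1, e2, e3) p).2.2.items
        = (pvStepA1 d1 p).items.map (fun q => (q.1, pvPorts "r" q.2)) := by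
  cases hh : PySem.Str.startswith p.1 "h" with
  | true =>
    have hr : PySem.Str.startswith p.1 "r" = false := pv_h_not_r p.1 hh
    by_cases hc : d1.contains (PySem.List.pyGetD (pvSplitDash p.2) 0 "") = true
    · have hA : pvStepA1 d1 p
          = d1.insert (PySem.List.pyGetD (pvSplitDash p.2) 0 "")
              (d1.getD (PySem.List.pyGetD (pvSplitDash p.2) 0 "") []
                ++ [(p.1, PySem.List.pyGetD (pvSplitDash p.2) 1 "")]) := by
        simp only [pvStepA1, hh, if_true, hc, PySem.Dict.modify]
      have hB : pvStepB (d1, e2, e3) p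
          = (d1.modify (PySem.List.pyGetD (pvSplitDash p.2) 0 "") []
               (· ++ [(p.1, PySem.List.pyGetD (pvSplitDash p.2) 1 "")]),
             e2.modify (PySem.List.pyGetD (pvSplitDash p.2) 0 "") []
               (· ++ [PySem.List.pyGetD (pvSplitDash p.2) 1 ""]),
             e3) := by
        simp only [pvStepB, hh, Bool.true_or, if_true, hc]
      refine ⟨?_, ?_, ?_, ?_⟩
      · rw [hB, hA]; simp only [PySem.Dict.modify]
      · rw [hA]; exact PySem.Dict.nodup_keys_insert _ _ _ hnd
      · rw [hB, hA]
        exact pvE_modify d1 e2 "h" hnd h2 _ (p.1, PySem.List.pyGetD (pvSplitDash p.2) 1 "") hc hh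
      · rw [hB, hA]
        exact pvE_skip d1 e3 "r" hnd h3 _ (p.1, PySem.List.pyGetD (pvSplitDash p.2) 1 "") hc hr
    · have hc' : d1.contains (PySem.List.pyGetD (pvSplitDash p.2) 0 "") = false := by
        simpa using hc
      have hA : pvStepA1 d1 p
          = d1.insert (PySem.List.pyGetD (pvSplitDash p.2) 0 "")
              [(p.1, PySem.List.pyGetD (pvSplitDash p.2) 1 "")] := by
        simp only [pvStepA1, hh, if_true, hc', Bool.false_eq_true, if_false, PySem.Dict.modify,
          PySem.Dict.getD_insert_self, PySem.Dict.insert_insert_self, List.nil_append]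
      have hB : pvStepB (d1, e2, e3) p
          = ((d1.insert (PySem.List.pyGetD (pvSplitDash p.2) 0 "") []).modify
               (PySem.List.pyGetD (pvSplitDash p.2) 0 "") []
               (· ++ [(p.1, PySem.List.pyGetD (pvSplitDash p.2) 1 "")]),
             (e2.insert (PySem.List.pyGetD (pvSplitDash p.2) 0 "") []).modify
               (PySem.List.pyGetD (pvSplitDash p.2) 0 "") []
               (· ++ [PySem.List.pyGetD (pvSplitDash p.2) 1 ""]),
             e3.insert (PySem.List.pyGetD (pvSplitDash p.2) 0 "") []) := by
        simp only [pvStepB, hh, Bool.true_or, if_true, hc', Bool.false_eq_true, if_false]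
      refine ⟨?_, ?_, ?_, ?_⟩
      · rw [hB, hA]
        simp only [PySem.Dict.modify, PySem.Dict.getD_insert_self,
          PySem.Dict.insert_insert_self, List.nil_append]
      · rw [hA]; exact PySem.Dict.nodup_keys_insert _ _ _ hnd
      · rw [hB, hA]
        exact pvE_fresh_app d1 e2 "h" h2 _ (p.1, PySem.List.pyGetD (pvSplitDash p.2) 1 "") hc' hh
      · rw [hB, hA]
        exact pvE_fresh_skip d1 e3 "r" h3 _ (p.1, PySem.List.pyGetD (pvSplitDash p.2) 1 "") hc' hr
  | false =>
    cases hr : PySem.Str.startswith p.1 "r" with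
    | true =>
      by_cases hc : d1.contains (PySem.List.pyGetD (pvSplitDash p.2) 0 "") = true
      · have hA : pvStepA1 d1 p
            = d1.insert (PySem.List.pyGetD (pvSplitDash p.2) 0 "")
                (d1.getD (PySem.List.pyGetD (pvSplitDash p.2) 0 "") []
                  ++ [(p.1, PySem.List.pyGetD (pvSplitDash p.2) 1 "")]) := by
          simp only [pvStepA1, hh, Bool.false_eq_true, if_false, hr, if_true, hc,
            PySem.Dict.modify]
        have hB : pvStepB (d1, e2, e3) p
            = (d1.modify (PySem.List.pyGetD (pvSplitDash p.2) 0 "") []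
                 (· ++ [(p.1, PySem.List.pyGetD (pvSplitDash p.2) 1 "")]),
               e2,
               e3.modify (PySem.List.pyGetD (pvSplitDash p.2) 0 "") []
                 (· ++ [PySem.List.pyGetD (pvSplitDash p.2) 1 ""])) := by
          simp only [pvStepB, hh, hr, Bool.false_or, if_true, hc, Bool.false_eq_true, if_false]
        refine ⟨?_, ?_, ?_, ?_⟩
        · rw [hB, hA]; simp only [PySem.Dict.modify]
        · rw [hA]; exact PySem.Dict.nodup_keys_insert _ _ _ hnd
        · rw [hB, hA]
          exact pvE_skip d1 e2 "h" hnd h2 _ (p.1, PySem.List.pyGetD (pvSplitDash p.2) 1 "") hc hh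
        · rw [hB, hA]
          exact pvE_modify d1 e3 "r" hnd h3 _ (p.1, PySem.List.pyGetD (pvSplitDash p.2) 1 "") hc hr
      · have hc' : d1.contains (PySem.List.pyGetD (pvSplitDash p.2) 0 "") = false := by
          simpa using hc
        have hA : pvStepA1 d1 p
            = d1.insert (PySem.List.pyGetD (pvSplitDash p.2) 0 "")
                [(p.1, PySem.List.pyGetD (pvSplitDash p.2) 1 "")] := by
          simp only [pvStepA1, hh, Bool.false_eq_true, if_false, hr, if_true, hc',
            PySem.Dict.modify, PySem.Dict.getD_insert_self, PySem.Dict.insert_insert_self,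
            List.nil_append]
        have hB : pvStepB (d1, e2, e3) p
            = ((d1.insert (PySem.List.pyGetD (pvSplitDash p.2) 0 "") []).modify
                 (PySem.List.pyGetD (pvSplitDash p.2) 0 "") []
                 (· ++ [(p.1, PySem.List.pyGetD (pvSplitDash p.2) 1 "")]),
               e2.insert (PySem.List.pyGetD (pvSplitDash p.2) 0 "") [],
               (e3.insert (PySem.List.pyGetD (pvSplitDash p.2) 0 "") []).modify
                 (PySem.List.pyGetD (pvSplitDash p.2) 0 "") []
                 (· ++ [PySem.List.pyGetD (pvSplitDash p.2) 1 ""])) := by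
          simp only [pvStepB, hh, hr, Bool.false_or, if_true, hc', Bool.false_eq_true, if_false]
        refine ⟨?_, ?_, ?_, ?_⟩
        · rw [hB, hA]
          simp only [PySem.Dict.modify, PySem.Dict.getD_insert_self,
            PySem.Dict.insert_insert_self, List.nil_append]
        · rw [hA]; exact PySem.Dict.nodup_keys_insert _ _ _ hnd
        · rw [hB, hA]
          exact pvE_fresh_skip d1 e2 "h" h2 _ (p.1, PySem.List.pyGetD (pvSplitDash p.2) 1 "") hc' hh
        · rw [hB, hA]
          exact pvE_fresh_app d1 e3 "r" h3 _ (p.1, PySem.List.pyGetD (pvSplitDash p.2) 1 "") hc' hr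
    | false =>
      have hA : pvStepA1 d1 p = d1 := by
        simp only [pvStepA1, hh, hr, Bool.false_eq_true, if_false]
      have hB : pvStepB (d1, e2, e3) p = (d1, e2, e3) := by
        simp only [pvStepB, hh, hr, Bool.or_self, Bool.false_eq_true, if_false]
      rw [hA, hB]
      exact ⟨rfl, hnd, h2, h3⟩

-- fold invariant
theorem pvFold_inv (links : List (String × String))
    (d1 : PySem.Dict String (List (String × String)))
    (e2 e3 : PySem.Dict String (List String))
    (hnd : d1.keys.Nodup)
    (h2 : e2.items = d1.items.map (fun q => (q.1, pvPorts "h" q.2)))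
    (h3 : e3.items = d1.items.map (fun q => (q.1, pvPorts "r" q.2))) :
    (links.foldl pvStepB (d1, e2, e3)).1 = links.foldl pvStepA1 d1
    ∧ (links.foldl pvStepA1 d1).keys.Nodup
    ∧ (links.foldl pvStepB (d1, e2, e3)).2.1.items
        = (links.foldl pvStepA1 d1).items.map (fun q => (q.1, pvPorts "h" q.2))
    ∧ (links.foldl pvStepB (d1, e2, e3)).2.2.items
        = (links.foldl pvStepA1 d1).items.map (fun q => (q.1, pvPorts "r" q.2)) := by
  induction links generalizing d1 e2 e3 with
  | nil => exact ⟨rfl, hnd, h2, h3⟩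
  | cons p t ih =>
    obtain ⟨hs, hnd', h2', h3'⟩ := pvStep_inv d1 e2 e3 p hnd h2 h3
    simp only [List.foldl_cons]
    have hsB : pvStepB (d1, e2, e3) p
        = (pvStepA1 d1 p, (pvStepB (d1, e2, e3) p).2.1, (pvStepB (d1, e2, e3) p).2.2) := by
      rw [← hs]
    rw [hsB]
    exact ih _ _ _ hnd' h2' h3'

-- ===== VERDICT (by name: the statement is the Claim_ definition above) =====
theorem get_hosts_connected_to_switch_with_ports_and_routers_spec : Claim_equal_get_hosts_connected_to_switch_with_ports_and_routers := by
  intro links _ _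
  unfold Spec_get_hosts_connected_to_switch_with_ports_and_routers
  unfold get_hosts_connected_to_switch_with_ports_and_routers
  unfold get_hosts_connected_to_switch_with_ports_and_routers_alt
  obtain ⟨hs, hnd, h2, h3⟩ := pvFold_inv links PySem.Dict.empty PySem.Dict.empty PySem.Dict.empty
    PySem.Dict.nodup_keys_empty rfl rfl
  have hfst : ((links.foldl pvStepA1 PySem.Dict.empty).items.map Prod.fst).Nodup := hnd
  refine Prod.ext ?_ (Prod.ext ?_ ?_) <;> simp only
  · rw [hs]
  · rw [pvPass_items "h" _ PySem.Dict.empty (fun _ _ => rfl) hfst, h2]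
    simp [PySem.Dict.empty]
  · rw [pvPass_items "r" _ PySem.Dict.empty (fun _ _ => rfl) hfst, h3]
    simp [PySem.Dict.empty]
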